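-- pv_equiv track=rewrite | github.com/Leooon726/mindcraft | streamlit_app.py | merge_entity_banks
-- ===== SOURCE A (Python) =====
-- ENTITY_KEYS = ["people", "projects", "locations", "organizations", "assets"]
--
-- def normalize_entity_list(items) -> list[str]:
--     if isinstance(items, str):
--         items = [items]
--     if not isinstance(items, list):
--         return []
--     seen = set()
--     normalized: list[str] = []
--     for item in items:
--         if not isinstance(item, str):
--             continue
--         value = item.strip()
--         if not value or value in seen:
--             continue
--         seen.add(value)
--         normalized.append(value)
--     return normalized
--
-- def normalize_entity_bank(bank) -> dict:
--     normalized = {key: [] for key in ENTITY_KEYS}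
--     if not isinstance(bank, dict):
--         return normalized
--     for key in ENTITY_KEYS:
--         normalized[key] = normalize_entity_list(bank.get(key, []))
--     return normalized
--
-- def merge_entity_banks(base: dict, updates: dict) -> dict:
--     merged = normalize_entity_bank(base)
--     normalized_updates = normalize_entity_bank(updates)
--     for key in ENTITY_KEYS:
--         for item in normalized_updates[key]:
--             if item not in merged[key]:
--                 merged[key].append(item)
--     return merged
-- ===== SOURCE B (Python) =====
-- ENTITY_KEYS = ["people", "projects", "locations", "organizations", "assets"]
--
-- def merge_entity_banks(base: dict, updates: dict) -> dict:
--     def raw_list(bank, key):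
--         if not isinstance(bank, dict):
--             return []
--         value = bank.get(key, [])
--         if isinstance(value, str):
--             return [value]
--         return value if isinstance(value, list) else []
--
--     merged = {}
--     for key in ENTITY_KEYS:
--         seen = set()
--         out = []
--         for item in raw_list(base, key) + raw_list(updates, key):
--             if not isinstance(item, str):
--                 continue
--             value = item.strip()
--             if value and value not in seen:
--                 seen.add(value)
--                 out.append(value)
--         merged[key] = out
--     return merged
-- ===== Notes on version B (the rewrite author's own statement) =====
-- stated objective: simpler
-- what changed: B drops A's normalize-base/normalize-updates/nested membership-merge-loop structure and instead, per entity key, concatenates the raw base and updates values and runs a single first-seen strip-dedup pass over the concatenation.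
import Mathlib
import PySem

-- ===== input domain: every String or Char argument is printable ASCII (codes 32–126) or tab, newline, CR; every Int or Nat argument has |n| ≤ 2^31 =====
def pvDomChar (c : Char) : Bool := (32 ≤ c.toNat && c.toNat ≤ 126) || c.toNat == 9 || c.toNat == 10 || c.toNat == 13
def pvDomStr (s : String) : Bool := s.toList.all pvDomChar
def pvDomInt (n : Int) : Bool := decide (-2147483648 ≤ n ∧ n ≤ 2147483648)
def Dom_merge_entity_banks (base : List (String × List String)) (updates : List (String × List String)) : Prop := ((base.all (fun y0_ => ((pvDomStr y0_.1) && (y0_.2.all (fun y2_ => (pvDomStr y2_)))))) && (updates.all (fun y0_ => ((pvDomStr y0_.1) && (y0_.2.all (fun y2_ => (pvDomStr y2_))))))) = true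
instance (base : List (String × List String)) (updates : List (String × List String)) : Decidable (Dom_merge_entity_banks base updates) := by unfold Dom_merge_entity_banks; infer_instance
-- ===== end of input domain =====

-- B replaces A's normalize-each-bank-then-nested-merge-loop by a single per-key pass:
-- normalize the concatenation base-part ++ updates-part once (objective: simpler).

-- ===== PORT A =====
def pvEntityKeys : List String := ["people", "projects", "locations", "organizations", "assets"]

-- normalize_entity_list; on the ported domain items is a list of strings, so the isinstance branches are the identity
def pvNormalizeEntityList (items : List String) : List String :=
  (items.foldl (fun (st : PySem.Set String × List String) item =>
      let value := PySem.Str.strip item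
      if value = "" ∨ value ∈ st.1 then st
      else (PySem.Set.add st.1 value, st.2 ++ [value]))
    (PySem.Set.empty, [])).2

-- normalize_entity_bank; on the ported domain bank is always a dict
def pvNormalizeEntityBank (bank : List (String × List String)) : PySem.Dict String (List String) :=
  let normalized := pvEntityKeys.foldl (fun d key => d.insert key []) PySem.Dict.empty
  pvEntityKeys.foldl
    (fun d key => d.insert key (pvNormalizeEntityList ((PySem.Dict.mk bank).getD key [])))
    normalized

def merge_entity_banks (base : List (String × List String)) (updates : List (String × List String)) : List (String × List String) :=
  let merged := pvNormalizeEntityBank base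
  let normalized_updates := pvNormalizeEntityBank updates
  (pvEntityKeys.foldl
    (fun m key =>
      m.insert key
        ((normalized_updates.getD key []).foldl
          (fun cur item => if item ∈ cur then cur else cur ++ [item])
          (m.getD key [])))
    merged).items

-- ===== PORT B =====
-- Source B's single normalization pass over the concatenated raw list
def pvNormalizeConcat (items : List String) : List String :=
  (items.foldl (fun (st : PySem.Set String × List String) item =>
      let value := PySem.Str.strip item
      if value ≠ "" ∧ value ∉ st.1 then (PySem.Set.add st.1 value, st.2 ++ [value])
      else st)
    (PySem.Set.empty, [])).2

def merge_entity_banks_alt (base : List (String × List String)) (updates : List (String × List String)) : List (String × List String) :=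
  pvEntityKeys.map (fun key =>
    (key, pvNormalizeConcat ((PySem.Dict.mk base).getD key [] ++ (PySem.Dict.mk updates).getD key [])))

-- ===== PRECONDITION & SPEC =====
def Spec_merge_entity_banks (base : List (String × List String)) (updates : List (String × List String)) (out : List (String × List String)) : Prop := out = merge_entity_banks_alt base updates
instance (base : List (String × List String)) (updates : List (String × List String)) (out : List (String × List String)) : Decidable (Spec_merge_entity_banks base updates out) := by unfold Spec_merge_entity_banks; infer_instance

-- ===== CLAIM (what is proved, stated in full; the proofs are below) =====
def Claim_equal_merge_entity_banks : Prop := ∀ (base : List (String × List String)) (updates : List (String × List String)), Dom_merge_entity_banks base updates → Spec_merge_entity_banks base updates (merge_entity_banks base updates)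

-- ===== LEMMAS AND PROOFS =====

-- the shared normalization step of A, and A's merge loop, named for the proofs
def pvStepA (st : PySem.Set String × List String) (item : String) : PySem.Set String × List String :=
  let value := PySem.Str.strip item
  if value = "" ∨ value ∈ st.1 then st
  else (PySem.Set.add st.1 value, st.2 ++ [value])

def pvMergeLoop (acc : List String) (l : List String) : List String :=
  l.foldl (fun cur item => if item ∈ cur then cur else cur ++ [item]) acc

lemma pvNormalizeConcat_eq (l : List String) : pvNormalizeConcat l = pvNormalizeEntityList l := by
  unfold pvNormalizeConcat pvNormalizeEntityList
  congr 1
  have hstep : (fun (st : PySem.Set String × List String) item =>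
      let value := PySem.Str.strip item
      if value ≠ "" ∧ value ∉ st.1 then (PySem.Set.add st.1 value, st.2 ++ [value]) else st)
    = (fun (st : PySem.Set String × List String) item =>
      let value := PySem.Str.strip item
      if value = "" ∨ value ∈ st.1 then st
      else (PySem.Set.add st.1 value, st.2 ++ [value])) := by
    funext st item
    by_cases h : PySem.Str.strip item = "" ∨ PySem.Str.strip item ∈ st.1
    · simp only [if_pos h, if_neg (by tauto : ¬(PySem.Str.strip item ≠ "" ∧ PySem.Str.strip item ∉ st.1))]
    · simp only [if_neg h, if_pos (by tauto : PySem.Str.strip item ≠ "" ∧ PySem.Str.strip item ∉ st.1)]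
  rw [hstep]

lemma pvNormA_foldl (l : List String) (st : PySem.Set String × List String) :
    l.foldl (fun st item =>
      let value := PySem.Str.strip item
      if value = "" ∨ value ∈ st.1 then st
      else (PySem.Set.add st.1 value, st.2 ++ [value])) st = l.foldl pvStepA st := rfl

lemma pvInvariant (l : List String) : ∀ st : PySem.Set String × List String,
    (∀ v, v ∈ st.1 ↔ v ∈ st.2) →
    (∀ v, v ∈ (l.foldl pvStepA st).1 ↔ v ∈ (l.foldl pvStepA st).2) := by
  induction l with
  | nil => intro st h; exact h
  | cons x xs ih =>
      intro st h
      simp only [List.foldl_cons]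
      by_cases hc : PySem.Str.strip x = "" ∨ PySem.Str.strip x ∈ st.1
      · simpa only [pvStepA, if_pos hc] using ih st h
      · refine ih _ (fun v => ?_)
        simp only [pvStepA, if_neg hc, PySem.Set.mem_add, List.mem_append, List.mem_singleton, h v]

lemma pvMergeLoop_mem (l : List String) : ∀ (acc : List String) (v : String),
    v ∈ pvMergeLoop acc l ↔ v ∈ acc ∨ v ∈ l := by
  induction l with
  | nil => intro acc v; simp [pvMergeLoop]
  | cons x xs ih =>
      intro acc v
      simp only [pvMergeLoop, List.foldl_cons]
      by_cases hx : x ∈ acc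
      · rw [if_pos hx]
        rw [show List.foldl _ acc xs = pvMergeLoop acc xs from rfl, ih]
        constructor
        · rintro (h | h) <;> simp [h]
        · rintro (h | h)
          · exact Or.inl h
          · rcases List.mem_cons.mp h with h | h
            · exact Or.inl (h ▸ hx)
            · exact Or.inr h
      · rw [if_neg hx]
        rw [show List.foldl _ (acc ++ [x]) xs = pvMergeLoop (acc ++ [x]) xs from rfl, ih]
        simp only [List.mem_append, List.mem_cons]
        tauto

lemma pvMergeLoop_append_singleton (acc l : List String) (x : String) :
    pvMergeLoop acc (l ++ [x]) = if x ∈ pvMergeLoop acc l then pvMergeLoop acc l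
      else pvMergeLoop acc l ++ [x] := by
  simp [pvMergeLoop, List.foldl_append]

lemma pvMain (u : List String) : ∀ (acc0 acc iacc : List String) (s is : PySem.Set String),
    (∀ v, v ∈ is ↔ v ∈ iacc) → (∀ v, v ∈ s ↔ v ∈ acc) →
    pvMergeLoop acc0 iacc = acc →
    pvMergeLoop acc0 (u.foldl pvStepA (is, iacc)).2 = (u.foldl pvStepA (s, acc)).2 := by
  induction u with
  | nil => intro acc0 acc iacc s is _ _ h3; exact h3
  | cons x xs ih =>
      intro acc0 acc iacc s is h1 h2 h3
      have hmem : ∀ v, v ∈ iacc → v ∈ acc := fun v hv =>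
        h3 ▸ (pvMergeLoop_mem iacc acc0 v).mpr (Or.inr hv)
      simp only [List.foldl_cons]
      by_cases he : PySem.Str.strip x = ""
      · simp only [pvStepA, if_pos (Or.inl he)]
        exact ih acc0 acc iacc s is h1 h2 h3
      · by_cases hi : PySem.Str.strip x ∈ is
        · have hs : PySem.Str.strip x ∈ s := (h2 _).2 (hmem _ ((h1 _).1 hi))
          simp only [pvStepA, if_pos (Or.inr hi), if_pos (Or.inr hs)]
          exact ih acc0 acc iacc s is h1 h2 h3
        · by_cases hs : PySem.Str.strip x ∈ s
          · -- inner appends, outer skips: the value is already in acc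
            have hacc : PySem.Str.strip x ∈ acc := (h2 _).1 hs
            simp only [pvStepA, if_neg (by tauto : ¬(PySem.Str.strip x = "" ∨ PySem.Str.strip x ∈ is)),
              if_pos (Or.inr hs)]
            refine ih acc0 acc (iacc ++ [PySem.Str.strip x]) s _ (fun v => ?_) h2 ?_
            · simp [PySem.Set.mem_add, h1 v]
            · rw [pvMergeLoop_append_singleton, h3, if_pos hacc]
          · -- both append
            have hacc : PySem.Str.strip x ∉ acc := fun h => hs ((h2 _).2 h)
            simp only [pvStepA, if_neg (by tauto : ¬(PySem.Str.strip x = "" ∨ PySem.Str.strip x ∈ is)),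
              if_neg (by tauto : ¬(PySem.Str.strip x = "" ∨ PySem.Str.strip x ∈ s))]
            refine ih acc0 (acc ++ [PySem.Str.strip x]) (iacc ++ [PySem.Str.strip x]) _ _
              (fun v => ?_) (fun v => ?_) ?_
            · simp [PySem.Set.mem_add, h1 v]
            · simp [PySem.Set.mem_add, h2 v]
            · rw [pvMergeLoop_append_singleton, h3, if_neg hacc]

-- per-key equality: A's merge of the two normalized lists = one normalization of the concatenation
lemma pvKey (b u : List String) :
    pvMergeLoop (pvNormalizeEntityList b) (pvNormalizeEntityList u) = pvNormalizeConcat (b ++ u) := by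
  rw [pvNormalizeConcat_eq]
  unfold pvNormalizeEntityList
  rw [pvNormA_foldl, pvNormA_foldl, List.foldl_append, pvNormA_foldl]
  set st := b.foldl pvStepA (PySem.Set.empty, []) with hst
  have hinv : ∀ v, v ∈ st.1 ↔ v ∈ st.2 :=
    pvInvariant b (PySem.Set.empty, []) (by simp [PySem.Set.empty])
  have := pvMain u st.2 st.2 [] st.1 PySem.Set.empty (by simp [PySem.Set.empty]) hinv rfl
  simpa using this

-- generalized dict bookkeeping: with opaque per-key values the five-key folds reduce cheaply
lemma pvBank_getD (f : String → List String) (k : String) (hk : k ∈ pvEntityKeys) :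
    (pvEntityKeys.foldl (fun d key => d.insert key (f key))
        (pvEntityKeys.foldl (fun d key => d.insert key []) PySem.Dict.empty)).getD k [] = f k := by
  fin_cases hk <;>
    · simp only [pvEntityKeys, List.foldl_cons, List.foldl_nil]
      simp [PySem.Dict.getD_insert]

lemma pvShapeGen (nb nu : String → List String) :
    (pvEntityKeys.foldl (fun m key => m.insert key (pvMergeLoop (m.getD key []) (nu key)))
        (pvEntityKeys.foldl (fun d key => d.insert key (nb key))
            (pvEntityKeys.foldl (fun d key => d.insert key []) PySem.Dict.empty))).items
      = pvEntityKeys.map (fun key => (key, pvMergeLoop (nb key) (nu key))) := by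
  simp only [pvEntityKeys, List.foldl_cons, List.foldl_nil, List.map_cons, List.map_nil]
  simp [PySem.Dict.getD_insert, PySem.Dict.items_insert, PySem.Dict.contains_insert,
    PySem.Dict.empty]

-- A's concrete dict bookkeeping over the five keys, reduced to a map
lemma pvShapeA (base updates : List (String × List String)) :
    merge_entity_banks base updates =
      pvEntityKeys.map (fun key =>
        (key, pvMergeLoop (pvNormalizeEntityList ((PySem.Dict.mk base).getD key []))
                (pvNormalizeEntityList ((PySem.Dict.mk updates).getD key [])))) := by
  show (pvEntityKeys.foldl
      (fun m key => m.insert key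
        (((pvNormalizeEntityBank updates).getD key []).foldl
          (fun cur item => if item ∈ cur then cur else cur ++ [item]) (m.getD key [])))
      (pvNormalizeEntityBank base)).items = _
  have h := pvShapeGen
    (fun key => pvNormalizeEntityList ((PySem.Dict.mk base).getD key []))
    (fun key => (pvNormalizeEntityBank updates).getD key [])
  rw [show pvNormalizeEntityBank base =
      pvEntityKeys.foldl
        (fun d key => d.insert key (pvNormalizeEntityList ((PySem.Dict.mk base).getD key [])))
        (pvEntityKeys.foldl (fun d key => d.insert key []) PySem.Dict.empty) from rfl]
  rw [show (fun (m : PySem.Dict String (List String)) key => m.insert key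
        (((pvNormalizeEntityBank updates).getD key []).foldl
          (fun cur item => if item ∈ cur then cur else cur ++ [item]) (m.getD key [])))
      = (fun (m : PySem.Dict String (List String)) key => m.insert key
        (pvMergeLoop (m.getD key []) ((pvNormalizeEntityBank updates).getD key []))) from rfl]
  rw [h]
  refine List.map_congr_left (fun key hk => ?_)
  rw [show (pvNormalizeEntityBank updates).getD key [] =
      (pvEntityKeys.foldl
        (fun d k => d.insert k (pvNormalizeEntityList ((PySem.Dict.mk updates).getD k [])))
        (pvEntityKeys.foldl (fun d k => d.insert k []) PySem.Dict.empty)).getD key [] from rfl]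
  rw [pvBank_getD (fun k => pvNormalizeEntityList ((PySem.Dict.mk updates).getD k [])) key hk]

-- ===== VERDICT (by name: the statement is the Claim_ definition above) =====
theorem merge_entity_banks_spec : Claim_equal_merge_entity_banks := by
  intro base updates _
  show merge_entity_banks base updates = merge_entity_banks_alt base updates
  rw [pvShapeA]
  unfold merge_entity_banks_alt
  refine List.map_congr_left (fun key _ => ?_)
  rw [pvKey]
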